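-- pv_equiv track=rewrite | github.com/thepratholic/Competitive-Programming | LeetCode/Weekly Contest 458/Process String with Special Operations I.py | processStr
-- ===== SOURCE A (Python) =====
-- def processStr(s: str) -> str:
--     result = []
--
--     for ch in s:
--         if ch.islower():
--             result.append(ch)
--
--         elif ch == '*':
--             if result:
--                 result = result[:-1]
--
--         elif ch == '#':
--             result += result
--
--         elif ch == '%':
--             result.reverse()
--
--     return "".join(result)
-- ===== SOURCE B (Python) =====
-- def processStr(s: str) -> str:
--     # Two-stack representation: current text = reversed(left) + right.
--     # '%' is O(1) (swap the stacks); '#' appends right + reversed(left) + right.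
--     left, right = [], []
--     for ch in s:
--         if ch.islower():
--             right.append(ch)
--         elif ch == '*':
--             if not right:
--                 right = left[::-1]
--                 left = []
--             if right:
--                 right.pop()
--         elif ch == '#':
--             right = right + left[::-1] + right
--         elif ch == '%':
--             left, right = right, left
--     return "".join(reversed(left)) + "".join(right)
-- ===== Notes on version B (the rewrite author's own statement) =====
-- stated objective: alternative
-- what changed: A mutates one result list, reversing/copying the whole current text on '%' operations; B keeps a two-stack (left, right) representation of the text in which '%' is an O(1) swap of the stacks, '*' pops from the appropriate end, doubling appends right + reversed(left) + right, and the stacks are joined only once at the end.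
import Mathlib
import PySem

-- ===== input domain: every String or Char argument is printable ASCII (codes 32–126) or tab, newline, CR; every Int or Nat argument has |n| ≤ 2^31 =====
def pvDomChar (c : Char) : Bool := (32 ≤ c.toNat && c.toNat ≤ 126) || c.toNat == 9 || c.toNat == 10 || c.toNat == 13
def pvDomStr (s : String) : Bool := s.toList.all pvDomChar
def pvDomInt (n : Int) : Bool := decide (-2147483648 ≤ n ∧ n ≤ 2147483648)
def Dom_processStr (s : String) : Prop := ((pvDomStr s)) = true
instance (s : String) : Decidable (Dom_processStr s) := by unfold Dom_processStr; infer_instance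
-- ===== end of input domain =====

-- B replaces A's single mutated result list by a two-stack (left, right) representation in which '%' is an O(1) stack swap; the stacks are joined once at the end (alternative algorithm, measured same speed).

-- ===== PORT A =====
-- one iteration of A's loop over the running result list
def pvAStep (result : List Char) (ch : Char) : List Char :=
  if PySem.Chars.islower ch then result ++ [ch]
  else if ch = '*' then (if result ≠ [] then result.dropLast else result)
  else if ch = '#' then result ++ result
  else if ch = '%' then result.reverse
  else result

def processStr (s : String) : String :=
  String.mk (s.toList.foldl pvAStep [])

-- ===== PORT B =====
-- one iteration of B's loop over the (left, right) stack pair; text = left.reverse ++ right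
def pvBStep (st : List Char × List Char) (ch : Char) : List Char × List Char :=
  if PySem.Chars.islower ch then (st.1, st.2 ++ [ch])
  else if ch = '*' then
    let st' := if st.2 = [] then ([], st.1.reverse) else st
    if st'.2 = [] then st' else (st'.1, st'.2.dropLast)
  else if ch = '#' then (st.1, st.2 ++ st.1.reverse ++ st.2)
  else if ch = '%' then (st.2, st.1)
  else st

def processStr_alt (s : String) : String :=
  let st := s.toList.foldl pvBStep ([], [])
  String.mk (st.1.reverse ++ st.2)

-- ===== PRECONDITION & SPEC =====
def Spec_processStr (s : String) (out : String) : Prop := out = processStr_alt s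
instance (s : String) (out : String) : Decidable (Spec_processStr s out) := by unfold Spec_processStr; infer_instance

-- ===== CLAIM (what is proved, stated in full; the proofs are below) =====
def Claim_equal_processStr : Prop := ∀ (s : String), Dom_processStr s → Spec_processStr s (processStr s)

-- ===== LEMMAS AND PROOFS =====

lemma pv_dropLast_append {α : Type} (a b : List α) (h : b ≠ []) :
    (a ++ b).dropLast = a ++ b.dropLast := by
  induction a with
  | nil => rfl
  | cons x xs ih =>
      cases xs with
      | nil => cases b with
        | nil => exact absurd rfl h
        | cons y ys => simp
      | cons y ys => simpa using ih

lemma pv_step_inv (ch : Char) (st : List Char × List Char) :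
    pvAStep (st.1.reverse ++ st.2) ch = (pvBStep st ch).1.reverse ++ (pvBStep st ch).2 := by
  obtain ⟨L, R⟩ := st
  unfold pvAStep pvBStep
  by_cases h1 : PySem.Chars.islower ch
  · simp [h1]
  · simp only [h1, if_false, Bool.false_eq_true]
    by_cases h2 : ch = '*'
    · simp only [h2, if_true]
      by_cases hR : R = []
      · subst hR
        by_cases hL : L = []
        · subst hL; simp
        · have : L.reverse ≠ [] := by simpa using hL
          simp [this]
      · have hne : L.reverse ++ R ≠ [] := by simp [hR]
        simp [hR, hne, pv_dropLast_append _ _ hR]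
    · simp only [h2, if_false]
      by_cases h3 : ch = '#'
      · simp [h3]
      · simp only [h3, if_false]
        by_cases h4 : ch = '%'
        · simp [h4, List.reverse_append]
        · simp [h4]

lemma pv_fold_inv (l : List Char) (st : List Char × List Char) :
    l.foldl pvAStep (st.1.reverse ++ st.2) =
      (l.foldl pvBStep st).1.reverse ++ (l.foldl pvBStep st).2 := by
  induction l generalizing st with
  | nil => rfl
  | cons c cs ih =>
      simp only [List.foldl_cons, pv_step_inv c st]
      exact ih (pvBStep st c)

-- ===== VERDICT (by name: the statement is the Claim_ definition above) =====
theorem processStr_spec : Claim_equal_processStr := by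
  intro s _
  unfold Spec_processStr processStr processStr_alt
  have := pv_fold_inv s.toList ([], [])
  simpa using congrArg String.mk this
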